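-- pv_equiv track=rewrite | github.com/MichaelKarabinosh/CustomAdventV2 | CustomAdvent.py | create_infection
-- ===== SOURCE A (Python) =====
-- def create_infection(infection_pattern):
--     relative_list = []
--     initial_pos_x, initial_pos_y = 0,0
--     y_lines = infection_pattern.split(",")
--     for i in range(len(y_lines)): # find rel pos of weed
--         line = y_lines[i]
--         for j in range(len(line)):
--             if line[j] == "W":
--                 initial_pos_x = j + 1
--                 initial_pos_y = i + 1
--
--     for i in range(len(y_lines)): # create relative list of weed positions
--         line = y_lines[i]
--         for j in range(len(line)):
--             if line[j] == "1":
--                 found_pos_x = j + 1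
--                 found_pos_y = i + 1
--                 relative_list.append([found_pos_x-initial_pos_x, initial_pos_y-found_pos_y])
--
--     return relative_list
-- ===== SOURCE B (Python) =====
-- def create_infection(infection_pattern):
--     # Single left-to-right scan of the raw string: no split, track (column, row)
--     # counters, a last-wins anchor and a buffer of absolute '1' cells; then one
--     # final pass turns the buffer into anchor-relative coordinates.
--     ones = []
--     wx = wy = 0
--     x, y = 0, 1
--     for ch in infection_pattern:
--         if ch == ",":
--             x, y = 0, y + 1
--         else:
--             x += 1
--             if ch == "W":
--                 wx, wy = x, y
--             elif ch == "1":
--                 ones.append((x, y))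
--     return [[px - wx, wy - py] for px, py in ones]
-- ===== Notes on version B (the rewrite author's own statement) =====
-- stated objective: alternative
-- what changed: A splits the string on ',' and makes two separate nested index-loop passes over the resulting grid (one to find the last-W anchor, one to emit relative positions); B never splits: it makes a single character scan of the raw string maintaining (column,row) counters across commas, updating the anchor and buffering absolute '1' cells in the same pass, then maps the buffer to anchor-relative coordinates.
import Mathlib
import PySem

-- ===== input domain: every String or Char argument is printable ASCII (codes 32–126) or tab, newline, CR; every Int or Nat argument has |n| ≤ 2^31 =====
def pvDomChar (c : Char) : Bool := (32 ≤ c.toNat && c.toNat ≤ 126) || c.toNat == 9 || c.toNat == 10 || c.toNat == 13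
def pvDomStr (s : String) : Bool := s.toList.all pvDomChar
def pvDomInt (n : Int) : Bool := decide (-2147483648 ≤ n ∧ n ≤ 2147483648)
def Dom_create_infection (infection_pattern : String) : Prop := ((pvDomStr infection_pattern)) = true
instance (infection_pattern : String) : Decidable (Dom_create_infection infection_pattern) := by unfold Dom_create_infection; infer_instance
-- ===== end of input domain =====

-- B replaces A's split-on-',' plus two nested index-loop passes by one character
-- scan of the raw string carrying (column,row) counters, a last-wins anchor and a
-- buffer of absolute '1' cells; objective: alternative decomposition, same cost.

-- ===== PORT A =====
-- strings are handled as char lists (PySem.Chars is the exact List Char form of PySem.Str)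
def create_infection (infection_pattern : String) : List (List Int) :=
  let y_lines := PySem.Chars.splitOn infection_pattern.toList [',']
  let anchor : Int × Int :=
    (PySem.List.pyRange 0 (y_lines.length : Int) 1).foldl (fun st i =>
      let line := PySem.List.pyGetD y_lines i []
      (PySem.List.pyRange 0 (line.length : Int) 1).foldl (fun st j =>
        if PySem.List.pyGetD line j ' ' = 'W' then (j + 1, i + 1) else st) st)
      (0, 0)
  (PySem.List.pyRange 0 (y_lines.length : Int) 1).foldl (fun acc i =>
    let line := PySem.List.pyGetD y_lines i []
    (PySem.List.pyRange 0 (line.length : Int) 1).foldl (fun acc j =>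
      if PySem.List.pyGetD line j ' ' = '1' then
        acc ++ [[j + 1 - anchor.1, anchor.2 - (i + 1)]]
      else acc) acc)
    []

-- ===== PORT B =====
-- state = (ones buffer, anchor, current column, current row); one fold over the raw chars
def create_infection_alt (infection_pattern : String) : List (List Int) :=
  let st := infection_pattern.toList.foldl
    (fun (st : List (Int × Int) × (Int × Int) × Int × Int) ch =>
      let ones := st.1; let a := st.2.1; let x := st.2.2.1; let y := st.2.2.2
      if ch = ',' then (ones, a, 0, y + 1)
      else
        let x' := x + 1
        if ch = 'W' then (ones, (x', y), x', y)
        else if ch = '1' then (ones ++ [(x', y)], a, x', y)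
        else (ones, a, x', y))
    (([] : List (Int × Int)), ((0 : Int), (0 : Int)), (0 : Int), (1 : Int))
  st.1.map (fun p => [p.1 - st.2.1.1, st.2.1.2 - p.2])

-- ===== PRECONDITION & SPEC =====
def Spec_create_infection (infection_pattern : String) (out : List (List Int)) : Prop := out = create_infection_alt infection_pattern
instance (infection_pattern : String) (out : List (List Int)) : Decidable (Spec_create_infection infection_pattern out) := by unfold Spec_create_infection; infer_instance

-- ===== CLAIM (what is proved, stated in full; the proofs are below) =====
def Claim_equal_create_infection : Prop := ∀ (infection_pattern : String), Dom_create_infection infection_pattern → Spec_create_infection infection_pattern (create_infection infection_pattern)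

-- ===== LEMMAS AND PROOFS =====

-- recursive characterisation of str.split(",") (proof helper)
def sc : List Char → List (List Char)
  | [] => [[]]
  | c :: s => if c = ',' then [] :: sc s
              else match sc s with
                   | [] => [[c]]
                   | h :: t => (c :: h) :: t

theorem sc_ne_nil (l : List Char) : sc l ≠ [] := by
  cases l with
  | nil => simp [sc]
  | cons c s =>
      simp only [sc]
      split
      · simp
      · split <;> simp

theorem sc_headI_tail (l : List Char) : (sc l).headI :: (sc l).tail = sc l := by
  have := sc_ne_nil l
  cases hsc : sc l with
  | nil => exact absurd hsc this
  | cons h t => simp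

theorem go_eq (fuel : Nat) (l cur : List Char) (acc : List (List Char)) (h : l.length ≤ fuel) :
    PySem.Chars.splitOn.go [','] (fuel + 1) l cur acc
    = acc.reverse ++ (cur.reverse ++ (sc l).headI) :: (sc l).tail := by
  induction fuel generalizing l cur acc with
  | zero =>
      interval_cases hl : l.length
      cases l with
      | nil => simp [PySem.Chars.splitOn.go, sc]
      | cons c s => simp at hl
  | succ f ih =>
      cases l with
      | nil => simp [PySem.Chars.splitOn.go, sc]
      | cons c s =>
          simp only [List.length_cons] at h
          by_cases hc : c = ','
          · subst hc
            rw [show PySem.Chars.splitOn.go [','] (f + 1 + 1) (',' :: s) cur acc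
                = PySem.Chars.splitOn.go [','] (f + 1) s [] (cur.reverse :: acc) from by
              simp [PySem.Chars.splitOn.go, List.isPrefixOf]]
            rw [ih s [] (cur.reverse :: acc) (by omega)]
            simp [sc, sc_headI_tail]
          · rw [show PySem.Chars.splitOn.go [','] (f + 1 + 1) (c :: s) cur acc
                = PySem.Chars.splitOn.go [','] (f + 1) s (c :: cur) acc from by
              simp [PySem.Chars.splitOn.go, List.isPrefixOf]
              intro h'
              exact absurd h'.symm hc]
            rw [ih s (c :: cur) acc (by omega)]
            have := sc_ne_nil s
            cases hsc : sc s with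
            | nil => exact absurd hsc this
            | cons h t => simp [sc, hc, hsc]

theorem splitOn_comma (cs : List Char) : PySem.Chars.splitOn cs [','] = sc cs := by
  have hgo := go_eq cs.length cs [] [] le_rfl
  rw [PySem.Chars.splitOn, hgo]
  have := sc_ne_nil cs
  cases hsc : sc cs with
  | nil => exact absurd hsc this
  | cons h t => simp

-- the grid as a flat list of (column, row, char) cells, as B's scan walks it
def cells : List Char → Int → Int → List (Int × Int × Char)
  | [], _, _ => []
  | c :: s, x, y => if c = ',' then cells s 0 (y + 1) else (x + 1, y, c) :: cells s (x + 1) y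

-- the same cells read line by line from a split grid
def cellsLines (L : List (List Char)) (y0 : Int) : List (Int × Int × Char) :=
  (PySem.List.enumerate L y0).flatMap (fun yl =>
    (PySem.List.enumerate yl.2 1).map (fun xc => (xc.1, yl.1, xc.2)))

theorem cellsLines_cons (l : List Char) (L : List (List Char)) (y0 : Int) :
    cellsLines (l :: L) y0
    = (PySem.List.enumerate l 1).map (fun xc => (xc.1, y0, xc.2)) ++ cellsLines L (y0 + 1) := by
  simp [cellsLines, PySem.List.enumerate_cons]

theorem cells_eq (cs : List Char) (x y : Int) :
    cells cs x y
    = (PySem.List.enumerate (sc cs).headI (x + 1)).map (fun xc => (xc.1, y, xc.2))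
      ++ cellsLines (sc cs).tail (y + 1) := by
  induction cs generalizing x y with
  | nil => simp [cells, sc, cellsLines, PySem.List.enumerate_nil]
  | cons c s ih =>
      by_cases hc : c = ','
      · subst hc
        simp only [cells, sc]
        rw [ih 0 (y + 1)]
        have := sc_ne_nil s
        cases hsc : sc s with
        | nil => exact absurd hsc this
        | cons h t => simp [cellsLines_cons]
      · have := sc_ne_nil s
        cases hsc : sc s with
        | nil => exact absurd hsc this
        | cons h t =>
            simp only [cells, if_neg hc, sc, hsc]
            rw [ih (x + 1) y]
            simp [hsc, PySem.List.enumerate_cons]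

theorem cells_zero_one (cs : List Char) : cells cs 0 1 = cellsLines (sc cs) 1 := by
  rw [cells_eq]
  have := sc_ne_nil cs
  cases hsc : sc cs with
  | nil => exact absurd hsc this
  | cons h t => simp [cellsLines_cons]

-- enumerate offset shift
theorem enumerate_shift {α : Type} (l : List α) (t : Int) :
    PySem.List.enumerate l (t + 1) = (PySem.List.enumerate l t).map (fun p => (p.1 + 1, p.2)) := by
  induction l generalizing t with
  | nil => simp [PySem.List.enumerate_nil]
  | cons a l ih => simp [PySem.List.enumerate_cons, ih]

-- bridge: an index loop 'for k in range(len(xs))' whose body uses k and xs[k]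
-- is a fold over enumerate xs 0
theorem foldl_pyRange_eq_enumerate {α β : Type} (xs : List α) (d : α) (f : β → Int × α → β) (init : β) :
    (PySem.List.pyRange 0 (xs.length : Int) 1).foldl
      (fun acc j => f acc (j, PySem.List.pyGetD xs j d)) init
    = (PySem.List.enumerate xs 0).foldl f init := by
  rw [PySem.List.enumerate_eq_map_pyRange (d := d), List.foldl_map]
  simp [PySem.List.len]

-- both nested index loops of A at once, straight to a fold over the flat cell list
theorem nested_bridge {β : Type} (L : List (List Char)) (g : β → Int × Int × Char → β) (init : β) :
    (PySem.List.pyRange 0 (L.length : Int) 1).foldl (fun acc i =>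
      let line := PySem.List.pyGetD L i []
      (PySem.List.pyRange 0 (line.length : Int) 1).foldl
        (fun acc j => g acc (j + 1, i + 1, PySem.List.pyGetD line j ' ')) acc) init
    = (cellsLines L 1).foldl g init := by
  rw [foldl_pyRange_eq_enumerate L [] (fun acc il =>
      (PySem.List.pyRange 0 (il.2.length : Int) 1).foldl
        (fun acc j => g acc (j + 1, il.1 + 1, PySem.List.pyGetD il.2 j ' ')) acc) init]
  have key : ∀ (L' : List (Int × List Char)) (init' : β),
      L'.foldl (fun acc il =>
        (PySem.List.pyRange 0 (il.2.length : Int) 1).foldl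
          (fun acc j => g acc (j + 1, il.1 + 1, PySem.List.pyGetD il.2 j ' ')) acc) init'
      = (L'.flatMap (fun yl =>
          (PySem.List.enumerate yl.2 1).map (fun xc => (xc.1, yl.1 + 1, xc.2)))).foldl g init' := by
    intro L' init'
    induction L' generalizing init' with
    | nil => simp
    | cons il rest ih =>
        simp only [List.foldl_cons, List.flatMap_cons, List.foldl_append]
        rw [foldl_pyRange_eq_enumerate il.2 ' '
          (fun acc jc => g acc (jc.1 + 1, il.1 + 1, jc.2)) init']
        have h1 : PySem.List.enumerate il.2 1
            = (PySem.List.enumerate il.2 0).map (fun p => (p.1 + 1, p.2)) := by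
          simpa using enumerate_shift il.2 0
        rw [h1, List.map_map, List.foldl_map, ih]
        simp [Function.comp]
  rw [key]
  -- shift the row index: enumerate L 0 with rows il.1 + 1  =  enumerate L 1 with rows il.1
  have hcl : (PySem.List.enumerate L 0).flatMap (fun yl =>
      (PySem.List.enumerate yl.2 1).map (fun xc => (xc.1, yl.1 + 1, xc.2)))
      = cellsLines L 1 := by
    unfold cellsLines
    rw [show (1 : Int) = 0 + 1 from rfl, enumerate_shift, List.flatMap_map]
    simp
  rw [hcl]

-- B's scan state after consuming cs, in terms of the flat cell list
def wOf (cl : List (Int × Int × Char)) (a : Int × Int) : Int × Int :=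
  cl.foldl (fun st c => if c.2.2 = 'W' then (c.1, c.2.1) else st) a

def onesOf (cl : List (Int × Int × Char)) : List (Int × Int) :=
  cl.filterMap (fun c => if c.2.2 = '1' then some (c.1, c.2.1) else none)

def endPos : List Char → Int → Int → Int × Int
  | [], x, y => (x, y)
  | c :: s, x, y => if c = ',' then endPos s 0 (y + 1) else endPos s (x + 1) y

theorem flat_fold (cs : List Char) (ones : List (Int × Int)) (a : Int × Int) (x y : Int) :
    cs.foldl
      (fun (st : List (Int × Int) × (Int × Int) × Int × Int) ch =>
        if ch = ',' then (st.1, st.2.1, 0, st.2.2.2 + 1)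
        else if ch = 'W' then (st.1, (st.2.2.1 + 1, st.2.2.2), st.2.2.1 + 1, st.2.2.2)
        else if ch = '1' then (st.1 ++ [(st.2.2.1 + 1, st.2.2.2)], st.2.1, st.2.2.1 + 1, st.2.2.2)
        else (st.1, st.2.1, st.2.2.1 + 1, st.2.2.2))
      (ones, a, x, y)
    = (ones ++ onesOf (cells cs x y), wOf (cells cs x y) a, endPos cs x y) := by
  induction cs generalizing ones a x y with
  | nil => simp [cells, onesOf, wOf, endPos]
  | cons c s ih =>
      simp only [List.foldl_cons]
      by_cases hc : c = ','
      · subst hc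
        simp only [cells, endPos, if_true]
        exact ih ones a 0 (y + 1)
      · by_cases hw : c = 'W'
        · subst hw
          simp only [cells, endPos, if_neg (show ¬('W' : Char) = ',' by decide), if_true]
          rw [ih ones (x + 1, y) (x + 1) y]
          simp [onesOf, wOf]
        · by_cases h1 : c = '1'
          · subst h1
            simp only [cells, endPos, if_neg (show ¬('1' : Char) = ',' by decide),
              if_neg (show ¬('1' : Char) = 'W' by decide), if_true]
            rw [ih (ones ++ [(x + 1, y)]) a (x + 1) y]
            simp [onesOf, wOf]
          · simp only [cells, endPos, if_neg hc, if_neg hw, if_neg h1]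
            rw [ih ones a (x + 1) y]
            simp [onesOf, wOf, hw, h1]

-- A's append-if collection over the cell list, with anchor w fixed
theorem ones_fold (cl : List (Int × Int × Char)) (w : Int × Int) :
    cl.foldl (fun acc c => if c.2.2 = '1' then acc ++ [[c.1 - w.1, w.2 - c.2.1]] else acc)
      ([] : List (List Int))
    = (onesOf cl).map (fun p => [p.1 - w.1, w.2 - p.2]) := by
  have hfn : (fun (acc : List (List Int)) (c : Int × Int × Char) =>
      if c.2.2 = '1' then acc ++ [[c.1 - w.1, w.2 - c.2.1]] else acc)
      = (fun acc c => if (fun (c : Int × Int × Char) => c.2.2 == '1') c = true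
          then acc ++ [(fun (c : Int × Int × Char) => [c.1 - w.1, w.2 - c.2.1]) c] else acc) := by
    funext acc c
    simp
  rw [hfn, PySem.List.foldl_append_if]
  simp only [List.nil_append, onesOf]
  induction cl with
  | nil => simp
  | cons c cl ih =>
      by_cases h1 : c.2.2 = '1' <;> simp [h1, ih]

-- ===== VERDICT (by name: the statement is the Claim_ definition above) =====
theorem create_infection_spec : Claim_equal_create_infection := by
  intro s _
  unfold Spec_create_infection create_infection create_infection_alt
  simp only [splitOn_comma]
  rw [nested_bridge (sc s.toList)
    (fun st c => if c.2.2 = 'W' then (c.1, c.2.1) else st) ((0 : Int), (0 : Int))]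
  rw [show (cellsLines (sc s.toList) 1).foldl
      (fun st c => if c.2.2 = 'W' then (c.1, c.2.1) else st) ((0 : Int), (0 : Int))
      = wOf (cellsLines (sc s.toList) 1) (0, 0) from rfl]
  rw [nested_bridge (sc s.toList)
    (fun acc c => if c.2.2 = '1' then
        acc ++ [[c.1 - (wOf (cellsLines (sc s.toList) 1) (0, 0)).1,
                 (wOf (cellsLines (sc s.toList) 1) (0, 0)).2 - c.2.1]]
      else acc) ([] : List (List Int))]
  rw [flat_fold s.toList [] (0, 0) 0 1]
  rw [cells_zero_one]
  rw [ones_fold (cellsLines (sc s.toList) 1) (wOf (cellsLines (sc s.toList) 1) (0, 0))]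
  rfl
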